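-- pv_equiv track=rewrite | github.com/VishnuArun0017/healthcare-chatbot | api/graph/fallback.py | get_safe_actions
-- ===== SOURCE A (Python) =====
-- SAFE_ACTIONS = {
--     "Hypertension": [
--         "Sip oral rehydration solution in small amounts",
--         "Practice slow deep-breathing exercises",
--         "Rest with head elevated and monitor blood pressure"
--     ],
--     "Diabetes": [
--         "Sip oral rehydration solution in small amounts",
--         "Follow the personalised sick-day meal plan from your doctor",
--         "Check blood glucose regularly during illness"
--     ],
--     "Pregnancy": [
--         "Stay hydrated with safe warm fluids",
--         "Rest on the left side when possible",
--         "Contact antenatal care provider for persistent symptoms"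
--     ]
-- }
--
-- def get_safe_actions(user_conditions):
--     """Get safe actions that are acceptable across user's metabolic conditions"""
--     if not user_conditions:
--         return []
--
--     condition_sets = []
--     for condition in user_conditions:
--         if condition in SAFE_ACTIONS:
--             condition_sets.append(set(SAFE_ACTIONS[condition]))
--
--     if not condition_sets:
--         return []
--
--     safe_union = condition_sets[0]
--     for s in condition_sets[1:]:
--         safe_union = safe_union.intersection(s)
--
--     return [{"safeAction": action} for action in sorted(safe_union)]
-- ===== SOURCE B (Python) =====
-- SAFE_ACTIONS = {
--     "Hypertension": [
--         "Sip oral rehydration solution in small amounts",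
--         "Practice slow deep-breathing exercises",
--         "Rest with head elevated and monitor blood pressure"
--     ],
--     "Diabetes": [
--         "Sip oral rehydration solution in small amounts",
--         "Follow the personalised sick-day meal plan from your doctor",
--         "Check blood glucose regularly during illness"
--     ],
--     "Pregnancy": [
--         "Stay hydrated with safe warm fluids",
--         "Rest on the left side when possible",
--         "Contact antenatal care provider for persistent symptoms"
--     ]
-- }
--
-- def get_safe_actions(user_conditions):
--     """Frequency-table version: an action is safe for all conditions iff its
--     count equals the number of recognized conditions seen."""
--     recognized = 0
--     counts = {}
--     for condition in user_conditions:
--         actions = SAFE_ACTIONS.get(condition)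
--         if actions is None:
--             continue
--         recognized += 1
--         for action in set(actions):
--             counts[action] = counts.get(action, 0) + 1
--     if recognized == 0:
--         return []
--     return [{"safeAction": a}
--             for a in sorted(a for a, c in counts.items() if c == recognized)]
-- ===== Notes on version B (the rewrite author's own statement) =====
-- stated objective: alternative
-- what changed: Replaces the build-a-list-of-sets-then-fold-intersections algorithm by a single pass keeping a count of recognized conditions and a frequency table of actions; an action is kept iff its frequency equals the number of recognized conditions.
import Mathlib
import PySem

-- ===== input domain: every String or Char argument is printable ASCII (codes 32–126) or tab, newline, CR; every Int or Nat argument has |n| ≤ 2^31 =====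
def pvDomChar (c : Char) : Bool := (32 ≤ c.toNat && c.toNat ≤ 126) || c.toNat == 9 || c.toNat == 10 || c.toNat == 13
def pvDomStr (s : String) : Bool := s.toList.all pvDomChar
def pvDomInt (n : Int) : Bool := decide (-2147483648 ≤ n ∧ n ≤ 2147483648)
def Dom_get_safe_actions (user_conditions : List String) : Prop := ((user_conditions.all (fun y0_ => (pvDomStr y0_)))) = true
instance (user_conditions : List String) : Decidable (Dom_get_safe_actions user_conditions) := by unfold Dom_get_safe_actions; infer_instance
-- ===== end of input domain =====

-- B replaces A's fold of set intersections by a one-pass frequency table: count recognized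
-- conditions and per-action occurrences; keep actions whose count equals the recognized count.

-- ===== PORT A =====
def pvSAFE : PySem.Dict String (List String) :=
  PySem.Dict.ofList
    [("Hypertension",
      ["Sip oral rehydration solution in small amounts",
       "Practice slow deep-breathing exercises",
       "Rest with head elevated and monitor blood pressure"]),
     ("Diabetes",
      ["Sip oral rehydration solution in small amounts",
       "Follow the personalised sick-day meal plan from your doctor",
       "Check blood glucose regularly during illness"]),
     ("Pregnancy",
      ["Stay hydrated with safe warm fluids",
       "Rest on the left side when possible",
       "Contact antenatal care provider for persistent symptoms"])]

def get_safe_actions (user_conditions : List String) : List (List (String × String)) :=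
  if user_conditions = [] then []
  else
    let condition_sets : List (PySem.Set String) :=
      user_conditions.foldl (fun acc c =>
        if pvSAFE.contains c then acc ++ [PySem.Set.ofList (pvSAFE.getD c [])] else acc) []
    if condition_sets = [] then []
    else
      let safe_union := condition_sets.tail.foldl (fun s t => PySem.Set.inter s t) condition_sets.headI
      (PySem.List.sorted safe_union (fun x => x) false).map (fun a => [("safeAction", a)])

-- ===== PORT B =====
def get_safe_actions_alt (user_conditions : List String) : List (List (String × String)) :=
  let st := user_conditions.foldl (fun (st : Int × PySem.Dict String Int) c =>
      match pvSAFE.get? c with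
      | none => st
      | some actions =>
          (st.1 + 1,
           (PySem.Set.ofList actions).foldl (fun d a => d.insert a (d.getD a 0 + 1)) st.2))
    (0, PySem.Dict.empty)
  if st.1 = 0 then []
  else
    (PySem.List.sorted ((st.2.items.filter (fun p => p.2 == st.1)).map (fun p => p.1))
        (fun x => x) false).map (fun a => [("safeAction", a)])

-- ===== PRECONDITION & SPEC =====
def Spec_get_safe_actions (user_conditions : List String) (out : List (List (String × String))) : Prop := out = get_safe_actions_alt user_conditions
instance (user_conditions : List String) (out : List (List (String × String))) : Decidable (Spec_get_safe_actions user_conditions out) := by unfold Spec_get_safe_actions; infer_instance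

-- ===== CLAIM (what is proved, stated in full; the proofs are below) =====
def Claim_equal_get_safe_actions : Prop := ∀ (user_conditions : List String), Dom_get_safe_actions user_conditions → Spec_get_safe_actions user_conditions (get_safe_actions user_conditions)

-- ===== LEMMAS AND PROOFS =====

-- the recognized conditions of the input, and a condition's action set
def pvRecog (xs : List String) : List String := xs.filter (fun c => pvSAFE.contains c)
def pvActs (c : String) : PySem.Set String := PySem.Set.ofList (pvSAFE.getD c [])
-- all actions of all recognized conditions, with multiplicity per condition
def pvBig (xs : List String) : List String := (pvRecog xs).flatMap (fun c => pvActs c)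

theorem pv_contains_isSome (c : String) : pvSAFE.contains c = (pvSAFE.get? c).isSome := by
  simp only [PySem.Dict.contains, PySem.Dict.get?]
  rw [Bool.eq_iff_iff]
  simp [List.any_eq_true, List.find?_isSome]

theorem pv_foldB (xs : List String) : ∀ (k : Int) (d : PySem.Dict String Int),
    xs.foldl (fun (st : Int × PySem.Dict String Int) c =>
      match pvSAFE.get? c with
      | none => st
      | some actions =>
          (st.1 + 1,
           (PySem.Set.ofList actions).foldl (fun d a => d.insert a (d.getD a 0 + 1)) st.2))
      (k, d)
    = (k + ((pvRecog xs).length : Int),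
       ((pvBig xs)).foldl (fun d a => d.insert a (d.getD a 0 + 1)) d) := by
  induction xs with
  | nil => intro k d; simp [pvRecog, pvBig]
  | cons c cs ih =>
    intro k d
    match h : pvSAFE.get? c with
    | none =>
      have hc : pvSAFE.contains c = false := by rw [pv_contains_isSome, h]; rfl
      simp [List.foldl_cons, h, ih, pvRecog, pvBig, hc]
    | some actions =>
      have hc : pvSAFE.contains c = true := by rw [pv_contains_isSome, h]; rfl
      have hacts : pvActs c = PySem.Set.ofList actions := by
        simp [pvActs, PySem.Dict.getD, h]
      simp only [List.foldl_cons, h, ih, Prod.mk.injEq]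
      refine ⟨?_, ?_⟩
      · simp [pvRecog, hc]; ring
      · simp [pvBig, pvRecog, hc, hacts, List.flatMap_cons, List.foldl_append]

theorem pv_mem_foldl_inter (ts : List (PySem.Set String)) : ∀ (s : PySem.Set String) (a : String),
    a ∈ ts.foldl (fun s t => PySem.Set.inter s t) s ↔ a ∈ s ∧ ∀ t ∈ ts, a ∈ t := by
  induction ts with
  | nil => simp
  | cons t ts ih =>
    intro s a
    simp [List.foldl_cons, ih, PySem.Set.mem_inter]
    tauto

theorem pv_nodup_foldl_inter (ts : List (PySem.Set String)) : ∀ (s : PySem.Set String),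
    s.Nodup → (ts.foldl (fun s t => PySem.Set.inter s t) s).Nodup := by
  induction ts with
  | nil => intro s hs; simpa using hs
  | cons t ts ih => intro s hs; exact ih _ (PySem.Set.nodup_inter s t hs)

theorem pv_count_flatMap (a : String) (l : List String) :
    ((l.flatMap fun c => pvActs c).count a) = l.countP (fun c => a ∈ pvActs c) := by
  induction l with
  | nil => simp
  | cons c cs ih =>
    simp only [List.flatMap_cons, List.count_append, ih, List.countP_cons]
    by_cases h : a ∈ pvActs c
    · rw [List.count_eq_one_of_mem (show (pvActs c).Nodup from PySem.Set.nodup_ofList _) h]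
      simp [h]; omega
    · rw [List.count_eq_zero_of_not_mem h]
      simp [h]

theorem pv_main : ∀ (xs : List String), get_safe_actions xs = get_safe_actions_alt xs := by
  intro xs
  unfold get_safe_actions get_safe_actions_alt
  rw [pv_foldB]
  rw [PySem.List.foldl_append_if (p := fun c => pvSAFE.contains c)
        (f := fun c => PySem.Set.ofList (pvSAFE.getD c []))]
  simp only [List.nil_append]
  by_cases hr : pvRecog xs = []
  · -- no recognized conditions: both return []
    rw [show (xs.filter fun c => pvSAFE.contains c) = pvRecog xs from rfl, hr]
    simp
  · -- at least one recognized condition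
    have hxs : ¬ xs = [] := by
      intro h; subst h; exact hr rfl
    obtain ⟨r, rs, hrl⟩ := List.exists_cons_of_ne_nil hr
    rw [if_neg hxs,
        show (xs.filter fun c => pvSAFE.contains c) = pvRecog xs from rfl, hrl]
    simp only [List.map_cons, List.headI_cons, List.tail_cons]
    rw [if_neg (List.cons_ne_nil _ _),
        if_neg (show ¬((0:Int) + ((r :: rs).length : Int) = 0) by
          rw [List.length_cons]; push_cast; omega)]
    rw [PySem.Dict.foldl_insert_getD_add_one_eq_counter, PySem.Dict.items_counter]
    rw [List.filter_map, List.map_map]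
    simp only [Function.comp_def]
    congr 1
    refine PySem.List.sorted_eq_sorted_of_perm _ _ _ (fun _ _ h => h) ?_
    rw [List.perm_ext_iff_of_nodup
          (pv_nodup_foldl_inter _ _ (PySem.Set.nodup_ofList _))
          (List.Nodup.map (fun _ _ h => h) ((PySem.Set.nodup_ofList _).filter _))]
    intro a
    rw [pv_mem_foldl_inter]
    have hforall : (a ∈ PySem.Set.ofList (pvSAFE.getD r []) ∧
        ∀ t ∈ List.map (fun c => PySem.Set.ofList (pvSAFE.getD c [])) rs, a ∈ t)
        ↔ ∀ c ∈ pvRecog xs, a ∈ pvActs c := by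
      rw [hrl]
      constructor
      · rintro ⟨ha, hall⟩ c hc
        rcases List.mem_cons.mp hc with hc | hc
        · subst hc; exact ha
        · exact hall _ (List.mem_map.mpr ⟨c, hc, rfl⟩)
      · intro hall
        exact ⟨hall r (List.mem_cons_self ..),
               fun t ht => by
                 obtain ⟨c, hc, hct⟩ := List.mem_map.mp ht
                 subst hct; exact hall c (List.mem_cons.mpr (Or.inr hc))⟩
    rw [hforall]
    constructor
    · intro hall
      have hcnt : (pvBig xs).count a = (pvRecog xs).length := by
        rw [show (pvBig xs).count a = (pvRecog xs).countP (fun c => a ∈ pvActs c) from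
              pv_count_flatMap a _]
        exact List.countP_eq_length.mpr (by intro c hc; simpa using hall c hc)
      have hmem : a ∈ pvBig xs := by
        rw [show pvBig xs = (pvRecog xs).flatMap (fun c => pvActs c) from rfl, hrl]
        exact List.mem_flatMap.mpr ⟨r, List.mem_cons_self .., hall r (by rw [hrl]; exact List.mem_cons_self ..)⟩
      refine List.mem_map.mpr ⟨a, List.mem_filter.mpr ⟨(PySem.Set.mem_ofList _ _).mpr hmem, ?_⟩, rfl⟩
      rw [hcnt, hrl]
      simp only [beq_iff_eq, List.length_cons]
      push_cast; ring
    · intro hmem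
      obtain ⟨b, hb, hba⟩ := List.mem_map.mp hmem
      obtain ⟨hbmem, hbcnt⟩ := List.mem_filter.mp hb
      have hba' : b = a := by simpa using hba
      rw [hba'] at hbcnt
      simp only [beq_iff_eq] at hbcnt
      have hcnt : (pvBig xs).count a = (pvRecog xs).length := by
        rw [hrl]
        omega
      have h2 : (pvRecog xs).countP (fun c => a ∈ pvActs c) = (pvRecog xs).length := by
        rw [← pv_count_flatMap a (pvRecog xs)]
        exact hcnt
      intro c hc
      have := List.countP_eq_length.mp h2 c hc
      simpa using this

-- ===== VERDICT (by name: the statement is the Claim_ definition above) =====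
theorem get_safe_actions_spec : Claim_equal_get_safe_actions := by
  intro xs _
  exact pv_main xs
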